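-- pv_equiv track=rewrite | github.com/alchemistklk/leetcode_summary | contest/biweekly/89.py | countTime
-- ===== SOURCE A (Python) =====
-- def countTime(time: str) -> int:
--     # ans = 0
--     # # 枚举所有的小时
--     # for i in range(24):
--     #     # 枚举所有的分钟
--     #     for j in range(60):
--     #         s = f"{i:02d}:{j:02d}"
--     #         ok = True
--     #         # 同时遍历两个字符串的字符, 如果出现不相等的情况则标记为错
--     #         for t, c in zip(time, s):
--     #             if t != '?' and t != c:
--     #                 ok = False
--     #         if ok:
--     #             ans += 1
--     # return ans
--
--     # 分别枚举
--     def count(time: str, limit: int) -> int: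
--         ans = 0
--         for i in range(limit):
--             # 生成固定格式的字符串, 带有前导0的两位字符串
--             s = f"{i:02d}"
--             # 如果都满足括号里面的条件 则 + 1
--             if all(t == "?" or t == c for t, c in zip(time, s)):
--                 ans += 1
--
--         return ans
--
--     # 切片分别计算 小时 和 分钟
--     h = time[:2]
--     m = time[3:]
--
--     return count(h, 24) * count(m, 60)
-- ===== SOURCE B (Python) =====
-- def countTime(time: str) -> int:
--     # Direct brute force over all 24*60 clock times: count each (hour, minute)
--     # pair whose two-digit renderings match the hour pattern time[:2] and the
--     # minute pattern time[3:] (position 2 is never inspected, as in the task).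
--     hp = time[:2]
--     mp = time[3:]
--     ans = 0
--     for i in range(24):
--         hs = f"{i:02d}"
--         for j in range(60):
--             ms = f"{j:02d}"
--             if all(t == "?" or t == c for t, c in zip(hp, hs)) and \
--                all(t == "?" or t == c for t, c in zip(mp, ms)):
--                 ans += 1
--     return ans
-- ===== Notes on version B (the rewrite author's own statement) =====
-- stated objective: alternative
-- what changed: A counts hour matches and minute matches in two separate loops and multiplies the counts; B enumerates all 24*60 (hour, minute) pairs in one nested loop and counts the pairs where both halves of the pattern match.
import Mathlib
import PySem

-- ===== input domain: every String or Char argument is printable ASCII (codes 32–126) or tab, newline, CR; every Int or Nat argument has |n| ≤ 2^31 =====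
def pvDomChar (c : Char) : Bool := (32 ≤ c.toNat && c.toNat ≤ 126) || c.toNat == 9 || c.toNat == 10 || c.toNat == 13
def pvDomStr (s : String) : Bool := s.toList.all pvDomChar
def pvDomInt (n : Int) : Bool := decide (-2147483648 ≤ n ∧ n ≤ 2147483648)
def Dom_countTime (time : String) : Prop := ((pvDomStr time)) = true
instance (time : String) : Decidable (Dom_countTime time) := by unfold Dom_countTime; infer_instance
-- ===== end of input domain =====

-- B replaces A's multiply-two-separate-counts decomposition by a single nested
-- brute-force loop over all 24*60 (hour, minute) pairs (alternative decomposition).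


-- ===== PORT A =====
-- f"{i:02d}" for the loop indices (always nonnegative here): left-pad str(i) with '0' to width 2
def pvPad2 (i : Int) : List Char :=
  let s := PySem.Int.toChars i
  if s.length < 2 then '0' :: s else s

-- all(t == "?" or t == c for t, c in zip(pat, s))
def pvMatch (pat s : List Char) : Bool :=
  (pat.zip s).all (fun tc => tc.1 == '?' || tc.1 == tc.2)

-- inner helper `count(time, limit)` of A
def pvCountA (t : List Char) (limit : Int) : Int :=
  (PySem.List.pyRange 0 limit 1).foldl
    (fun ans i => if pvMatch t (pvPad2 i) then ans + 1 else ans) 0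

def countTime (time : String) : Int :=
  let h := PySem.List.slice time.toList none (some 2)
  let m := PySem.List.slice time.toList (some 3) none
  pvCountA h 24 * pvCountA m 60

-- ===== PORT B =====
def countTime_alt (time : String) : Int :=
  let hp := PySem.List.slice time.toList none (some 2)
  let mp := PySem.List.slice time.toList (some 3) none
  (PySem.List.pyRange 0 24 1).foldl
    (fun ans i =>
      (PySem.List.pyRange 0 60 1).foldl
        (fun ans j =>
          if pvMatch hp (pvPad2 i) && pvMatch mp (pvPad2 j) then ans + 1 else ans)
        ans)
    0

-- ===== PRECONDITION & SPEC =====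
def Spec_countTime (time : String) (out : Int) : Prop := out = countTime_alt time
instance (time : String) (out : Int) : Decidable (Spec_countTime time out) := by unfold Spec_countTime; infer_instance

-- ===== CLAIM (what is proved, stated in full; the proofs are below) =====
def Claim_equal_countTime : Prop := ∀ (time : String), Dom_countTime time → Spec_countTime time (countTime time)

-- ===== LEMMAS AND PROOFS =====

-- the count of j with `b && q j` is the count of q when b holds, else 0
theorem pv_countP_band (b : Bool) (q : Int → Bool) (l : List Int) :
    ((l.countP (fun x => b && q x) : Nat) : Int) = if b then (l.countP q : Int) else 0 := by
  cases b <;> simp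

-- accumulating `a + (if p i then K else 0)` over a list totals countP * K
theorem pv_outer_fold (K : Int) (p : Int → Bool) (l : List Int) (c : Int) :
    l.foldl (fun a i => a + if p i then K else 0) c
      = c + (l.countP p : Int) * K := by
  rw [PySem.List.foldl_add l (fun i => if p i then K else 0) c]
  congr 1
  induction l with
  | nil => simp
  | cons x xs ih =>
    simp only [List.map_cons, List.sum_cons, List.countP_cons, ih]
    by_cases h : p x = true
    · simp [h]; ring
    · simp [h]

-- ===== VERDICT (by name: the statement is the Claim_ definition above) =====
theorem countTime_spec : Claim_equal_countTime := by
  intro time _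
  unfold Spec_countTime countTime countTime_alt pvCountA
  simp only [PySem.List.foldl_count_if, pv_countP_band, pv_outer_fold]
  ring
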